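-- pv_equiv track=rewrite | github.com/oxyraptor/Heat-Sink | verify_and_test_system.py | validate_recommendation_response
-- ===== SOURCE A (Python) =====
-- from typing import Dict, List, Optional, Tuple, Any
--
-- def validate_recommendation_response(data: Dict) -> Tuple[bool, List[str]]:
--     """Validate heat sink recommendation response"""
--     errors = []
--
--     if 'data' not in data:
--         errors.append("Missing 'data' field")
--         return False, errors
--
--     response_data = data['data']
--     required_sections = ['recommended_geometry', 'thermal_performance', 'manufacturing_info']
--
--     for section in required_sections:
--         if section not in response_data:
--             errors.append(f"Missing section: {section}")
--
--     # Validate geometry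
--     if 'recommended_geometry' in response_data:
--         geom = response_data['recommended_geometry']
--         required_geom = ['fin_height_mm', 'fin_thickness_mm', 'number_of_fins', 'total_mass_g']
--         for field in required_geom:
--             if field not in geom:
--                 errors.append(f"Geometry missing field: {field}")
--
--     # Validate thermal performance
--     if 'thermal_performance' in response_data:
--         perf = response_data['thermal_performance']
--         required_perf = ['thermal_resistance_k_per_w', 'junction_temp_c']
--         for field in required_perf:
--             if field not in perf:
--                 errors.append(f"Performance missing field: {field}")
--
--     return len(errors) == 0, errors
-- ===== SOURCE B (Python) =====
-- SCHEMA = [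
--     ('recommended_geometry', 'Geometry',
--      ['fin_height_mm', 'fin_thickness_mm', 'number_of_fins', 'total_mass_g']),
--     ('thermal_performance', 'Performance',
--      ['thermal_resistance_k_per_w', 'junction_temp_c']),
--     ('manufacturing_info', None, []),
-- ]
--
-- def _check(schema, rd):
--     """Recursively walk the schema once, returning the pair
--     (missing-section errors, missing-field errors), each built back-to-front."""
--     if not schema:
--         return [], []
--     (key, label, fields) = schema[0]
--     miss, ferrs = _check(schema[1:], rd)
--     if key in rd:
--         sec = rd[key]
--         return miss, [f"{label} missing field: {f}" for f in fields if f not in sec] + ferrs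
--     return [f"Missing section: {key}"] + miss, ferrs
--
-- def validate_recommendation_response(data):
--     """Validate heat sink recommendation response"""
--     if 'data' not in data:
--         return False, ["Missing 'data' field"]
--     miss, ferrs = _check(SCHEMA, data['data'])
--     errors = miss + ferrs
--     return not errors, errors
-- ===== Notes on version B (the rewrite author's own statement) =====
-- stated objective: alternative
-- what changed: Replaced A's staged imperative passes (a section-presence loop followed by two hand-written per-section field blocks mutating one errors list) by a single recursive traversal of a schema table that returns a pair of lists (section errors, field errors) built back-to-front and concatenated at the end.
import Mathlib
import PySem

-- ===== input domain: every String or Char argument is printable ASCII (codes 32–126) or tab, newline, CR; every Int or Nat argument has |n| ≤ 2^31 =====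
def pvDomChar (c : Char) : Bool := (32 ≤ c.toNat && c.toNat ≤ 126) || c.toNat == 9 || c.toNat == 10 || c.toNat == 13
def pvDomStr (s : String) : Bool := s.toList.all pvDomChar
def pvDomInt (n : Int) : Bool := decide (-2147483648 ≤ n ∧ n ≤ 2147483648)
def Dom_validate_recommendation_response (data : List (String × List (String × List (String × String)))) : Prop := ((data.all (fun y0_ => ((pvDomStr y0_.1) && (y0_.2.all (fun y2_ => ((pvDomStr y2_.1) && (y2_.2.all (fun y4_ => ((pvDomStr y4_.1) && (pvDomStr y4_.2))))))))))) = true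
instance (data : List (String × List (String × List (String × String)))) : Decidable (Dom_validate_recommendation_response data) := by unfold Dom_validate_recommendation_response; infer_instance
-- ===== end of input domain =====

-- B replaces A's staged passes (section loop then per-section field blocks on one errors list)
-- by one recursive schema traversal returning a (section errors, field errors) pair concatenated
-- at the end: an alternative decomposition, same cost.


-- dict membership / lookup on an association list: Python's first-match rule
def pvLookup? {α : Type} (d : List (String × α)) (k : String) : Option α :=
  (d.find? (fun p => p.1 == k)).map (·.2)

-- ===== PORT A =====
def validate_recommendation_response (data : List (String × List (String × List (String × String)))) : Bool × List String :=
  let errors : List String := []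
  if (pvLookup? data "data").isNone then
    (false, errors ++ ["Missing 'data' field"])
  else
    let response_data := (pvLookup? data "data").getD []
    let required_sections := ["recommended_geometry", "thermal_performance", "manufacturing_info"]
    let errors := required_sections.foldl (fun errs section_ =>
        if (pvLookup? response_data section_).isNone then errs ++ ["Missing section: " ++ section_] else errs) errors
    let errors :=
      if (pvLookup? response_data "recommended_geometry").isSome then
        let geom := (pvLookup? response_data "recommended_geometry").getD []
        let required_geom := ["fin_height_mm", "fin_thickness_mm", "number_of_fins", "total_mass_g"]
        required_geom.foldl (fun errs field =>
          if (pvLookup? geom field).isNone then errs ++ ["Geometry missing field: " ++ field] else errs) errors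
      else errors
    let errors :=
      if (pvLookup? response_data "thermal_performance").isSome then
        let perf := (pvLookup? response_data "thermal_performance").getD []
        let required_perf := ["thermal_resistance_k_per_w", "junction_temp_c"]
        required_perf.foldl (fun errs field =>
          if (pvLookup? perf field).isNone then errs ++ ["Performance missing field: " ++ field] else errs) errors
      else errors
    (errors.length == 0, errors)

-- ===== PORT B =====
def pvSchema : List (String × String × List String) :=
  [("recommended_geometry", "Geometry",
    ["fin_height_mm", "fin_thickness_mm", "number_of_fins", "total_mass_g"]),
   ("thermal_performance", "Performance",
    ["thermal_resistance_k_per_w", "junction_temp_c"]),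
   ("manufacturing_info", "", [])]

-- recursive single pass over the schema, returning (section errors, field errors) back-to-front
def pvCheck (schema : List (String × String × List String))
    (rd : List (String × List (String × String))) : List String × List String :=
  match schema with
  | [] => ([], [])
  | (key, label, fields) :: rest =>
    let p := pvCheck rest rd
    if (pvLookup? rd key).isSome then
      let sec := (pvLookup? rd key).getD []
      (p.1, (fields.filter (fun f => (pvLookup? sec f).isNone)).map
              (fun f => (label ++ " missing field: ") ++ f) ++ p.2)
    else (("Missing section: " ++ key) :: p.1, p.2)

def validate_recommendation_response_alt (data : List (String × List (String × List (String × String)))) : Bool × List String :=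
  if (pvLookup? data "data").isNone then (false, ["Missing 'data' field"])
  else
    let p := pvCheck pvSchema ((pvLookup? data "data").getD [])
    let errors := p.1 ++ p.2
    (errors.isEmpty, errors)

-- ===== PRECONDITION & SPEC =====
def Spec_validate_recommendation_response (data : List (String × List (String × List (String × String)))) (out : Bool × List String) : Prop := out = validate_recommendation_response_alt data
instance (data : List (String × List (String × List (String × String)))) (out : Bool × List String) : Decidable (Spec_validate_recommendation_response data out) := by unfold Spec_validate_recommendation_response; infer_instance

-- ===== CLAIM (what is proved, stated in full; the proofs are below) =====
def Claim_equal_validate_recommendation_response : Prop := ∀ (data : List (String × List (String × List (String × String)))), Dom_validate_recommendation_response data → Spec_validate_recommendation_response data (validate_recommendation_response data)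

-- ===== LEMMAS AND PROOFS =====

theorem isEmpty_eq_length_beq_zero {α : Type} (l : List α) : l.isEmpty = (l.length == 0) := by
  cases l <;> rfl

theorem isSome_eq_bnot_isNone {α : Type} (o : Option α) : o.isSome = !o.isNone := by
  cases o <;> rfl

-- ===== VERDICT (by name: the statement is the Claim_ definition above) =====
theorem validate_recommendation_response_spec : Claim_equal_validate_recommendation_response := by
  intro data _
  unfold Spec_validate_recommendation_response validate_recommendation_response validate_recommendation_response_alt pvSchema
  by_cases hd : (pvLookup? data "data").isNone = true
  · simp [hd]
  · simp only [hd, Bool.false_eq_true, if_false]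
    rw [PySem.List.foldl_append_if, PySem.List.foldl_append_if, PySem.List.foldl_append_if]
    by_cases h1 : (pvLookup? ((pvLookup? data "data").getD []) "recommended_geometry").isNone = true <;>
      by_cases h2 : (pvLookup? ((pvLookup? data "data").getD []) "thermal_performance").isNone = true <;>
        by_cases h3 : (pvLookup? ((pvLookup? data "data").getD []) "manufacturing_info").isNone = true <;>
          simp [h1, h2, h3, pvCheck, isEmpty_eq_length_beq_zero, isSome_eq_bnot_isNone,
            List.filter, List.map]
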